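-- pv_equiv track=rewrite | github.com/Hyuoo/ReZeroPS | Programmers/L2/p17680.py | cscan
-- ===== SOURCE A (Python) =====
-- def cscan(c, csize, d):
--     last = 0
--     for i in range(csize):
--         if c[i][0]==d:
--             return True, i
--         if c[last][1]>c[i][1]:
--             last = i
--     return False, last
-- ===== SOURCE B (Python) =====
-- def cscan(c, csize, d):
--     # Phase 1: search for a cache hit.
--     for i in range(csize):
--         if c[i][0] == d:
--             return True, i
--     # Phase 2: no hit -- find the leftmost index with minimal timestamp (LRU slot).
--     last = 0
--     for i in range(1, csize):
--         if c[i][1] < c[last][1]: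
--             last = i
--     return False, last
-- ===== Notes on version B (the rewrite author's own statement) =====
-- stated objective: alternative
-- what changed: Splits A's single fused loop (match test and LRU-minimum update interleaved) into two separate phases: a pure search loop, and a leftmost-minimum scan over range(1,csize) that only runs when no match was found.
import Mathlib
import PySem

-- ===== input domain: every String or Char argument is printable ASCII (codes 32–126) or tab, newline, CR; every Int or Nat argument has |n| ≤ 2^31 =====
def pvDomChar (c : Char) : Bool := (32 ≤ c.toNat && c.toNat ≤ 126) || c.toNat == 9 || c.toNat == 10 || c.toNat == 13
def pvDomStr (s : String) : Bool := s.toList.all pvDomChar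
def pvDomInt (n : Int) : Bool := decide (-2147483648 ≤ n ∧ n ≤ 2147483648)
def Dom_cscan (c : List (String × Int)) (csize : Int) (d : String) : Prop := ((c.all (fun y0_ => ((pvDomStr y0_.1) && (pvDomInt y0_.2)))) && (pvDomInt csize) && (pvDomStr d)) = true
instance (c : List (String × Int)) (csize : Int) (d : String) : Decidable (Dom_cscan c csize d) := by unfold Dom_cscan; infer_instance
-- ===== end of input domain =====

-- B splits A's fused match+LRU loop into two separate phases (search loop, then a
-- leftmost-minimum scan run only on a miss); same O(csize) cost, different decomposition.

-- ===== PORT A =====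
-- A's single fused loop over range(csize): return on key match, else update 'last'.
def cscanLoopA (c : List (String × Int)) (d : String) : List Int → Int → Bool × Int
  | [], last => (false, last)
  | i :: rest, last =>
    match PySem.List.pyGet? c i with
    | none => (false, last)   -- IndexError in Python; outside Pre_
    | some p =>
      if p.1 == d then (true, i)
      else
        match PySem.List.pyGet? c last with
        | none => (false, last)   -- IndexError in Python; outside Pre_
        | some q =>
          if q.2 > p.2 then cscanLoopA c d rest i else cscanLoopA c d rest last

def cscan (c : List (String × Int)) (csize : Int) (d : String) : Bool × Int :=
  cscanLoopA c d (PySem.List.pyRange 0 csize 1) 0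

-- ===== PORT B =====
-- Phase 1 of B: first index in the range whose key equals d.
def cscanFind (c : List (String × Int)) (d : String) : List Int → Option Int
  | [] => none
  | i :: rest =>
    match PySem.List.pyGet? c i with
    | none => none   -- IndexError in Python; outside Pre_
    | some p => if p.1 == d then some i else cscanFind c d rest

-- Phase 2 of B: leftmost index with minimal timestamp (strict '<').
def cscanMin (c : List (String × Int)) : List Int → Int → Int
  | [], last => last
  | i :: rest, last =>
    match PySem.List.pyGet? c i, PySem.List.pyGet? c last with
    | some p, some q => if p.2 < q.2 then cscanMin c rest i else cscanMin c rest last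
    | _, _ => last   -- IndexError in Python; outside Pre_

def cscan_alt (c : List (String × Int)) (csize : Int) (d : String) : Bool × Int :=
  match cscanFind c d (PySem.List.pyRange 0 csize 1) with
  | some i => (true, i)
  | none => (false, cscanMin c (PySem.List.pyRange 1 csize 1) 0)

-- ===== PRECONDITION & SPEC =====
-- Pre_ is exactly where the Python A returns: either the whole range is in bounds,
-- or some key matches d (the loop then returns at the first match, before any bad index).
def Pre_cscan (c : List (String × Int)) (csize : Int) (d : String) : Prop :=
  csize ≤ (c.length : Int) ∨ ∃ p ∈ c, p.1 = d
instance (c : List (String × Int)) (csize : Int) (d : String) : Decidable (Pre_cscan c csize d) := by unfold Pre_cscan; infer_instance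

def pvWitness_cscan : (List (String × Int)) × Int × String := ([("a", 1), ("b", 2)], 2, "b")

def Spec_cscan (c : List (String × Int)) (csize : Int) (d : String) (out : Bool × Int) : Prop := out = cscan_alt c csize d
instance (c : List (String × Int)) (csize : Int) (d : String) (out : Bool × Int) : Decidable (Spec_cscan c csize d out) := by unfold Spec_cscan; infer_instance

-- ===== CLAIM (what is proved, stated in full; the proofs are below) =====
def Claim_equal_cscan : Prop := ∀ (c : List (String × Int)) (csize : Int) (d : String), Dom_cscan c csize d → Pre_cscan c csize d → Spec_cscan c csize d (cscan c csize d)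

-- ===== LEMMAS AND PROOFS =====

-- Total lookup used only in proofs (indices are shown in bounds before use).
def cgetd (c : List (String × Int)) (i : Int) : String × Int := c.getD i.toNat ("", 0)

theorem cget_some (c : List (String × Int)) (i : Int) (h0 : 0 ≤ i) (hlt : i < (c.length : Int)) :
    PySem.List.pyGet? c i = some (cgetd c i) := by
  rw [PySem.List.pyGet?_of_nonneg _ h0]
  simp [cgetd, List.getD_eq_getElem?_getD, List.getElem?_eq_getElem (by omega : i.toNat < c.length)]

-- An index list is Safe when each index is in bounds at least until the first match.
def CSafe (c : List (String × Int)) (d : String) : List Int → Prop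
  | [] => True
  | i :: rest => (0 ≤ i ∧ i < (c.length : Int)) ∧ ((cgetd c i).1 = d ∨ CSafe c d rest)

theorem csafe_of_all (c : List (String × Int)) (d : String) (L : List Int)
    (h : ∀ i ∈ L, 0 ≤ i ∧ i < (c.length : Int)) : CSafe c d L := by
  induction L with
  | nil => trivial
  | cons i rest ih =>
    exact ⟨h i (by simp), Or.inr (ih (fun j hj => h j (by simp [hj])))⟩

-- The main loop correspondence: under CSafe and a valid 'last',
-- A's fused loop = (match found ⇒ (true, it)) else (false, B's min fold over the same list).
theorem loopA_eq (c : List (String × Int)) (d : String) (L : List Int) (last : Int)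
    (hs : CSafe c d L) (hl : 0 ≤ last ∧ last < (c.length : Int)) :
    cscanLoopA c d L last =
      match cscanFind c d L with
      | some i => (true, i)
      | none => (false, cscanMin c L last) := by
  induction L generalizing last with
  | nil => simp [cscanLoopA, cscanFind, cscanMin]
  | cons i rest ih =>
    obtain ⟨⟨hi0, hilt⟩, hrest⟩ := hs
    have hig := cget_some c i hi0 hilt
    have hlg := cget_some c last hl.1 hl.2
    by_cases hm : (cgetd c i).1 = d
    · simp [cscanLoopA, cscanFind, hig, hm]
    · have hsr : CSafe c d rest := by
        rcases hrest with h | h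
        · exact absurd h hm
        · exact h
      have hb : ¬ (((cgetd c i).1 == d) = true) := by simpa using hm
      simp only [cscanLoopA, cscanFind, cscanMin, hig, hlg, gt_iff_lt]
      rw [if_neg hb]
      split_ifs with hcmp
      · exact ih i hsr ⟨hi0, hilt⟩
      · exact ih last hsr hl

theorem csafe_range (c : List (String × Int)) (d : String) :
    ∀ (m : Nat) (s : Int), 0 ≤ s →
    (∃ j : Int, s ≤ j ∧ j < (c.length : Int) ∧ (cgetd c j).1 = d) →
    CSafe c d (PySem.List.pyRange s (s + m) 1) := by
  intro m
  induction m with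
  | zero =>
    intro s _ _
    rw [PySem.List.pyRange_one_eq_nil (by omega : s + ((0:Nat):Int) ≤ s)]
    trivial
  | succ k ih =>
    intro s hs0 h
    obtain ⟨j, hsj, hjlt, hjm⟩ := h
    rw [PySem.List.pyRange_one_cons (by omega : s < s + ((k+1:Nat):Int))]
    have hslt : s < (c.length : Int) := by omega
    refine ⟨⟨hs0, hslt⟩, ?_⟩
    by_cases hms : (cgetd c s).1 = d
    · exact Or.inl hms
    · refine Or.inr ?_
      have he : s + ((k+1:Nat):Int) = (s+1) + ((k:Nat):Int) := by push_cast; ring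
      rw [he]
      refine ih (s+1) (by omega) ⟨j, ?_, hjlt, hjm⟩
      have hne : s ≠ j := fun h => hms (h ▸ hjm)
      omega

-- cscanMin starting at 0 over range(0,csize) = over range(1,csize): the i=0 step is a no-op.
theorem min_zero_step (c : List (String × Int)) (csize : Int) (hc : 0 < c.length) :
    cscanMin c (PySem.List.pyRange 0 csize 1) 0 =
    cscanMin c (PySem.List.pyRange 1 csize 1) 0 := by
  by_cases h : 1 ≤ csize
  · rw [PySem.List.pyRange_one_cons (by omega : (0:Int) < csize)]
    have hg := cget_some c 0 le_rfl (by omega)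
    simp [cscanMin, hg]
  · rw [PySem.List.pyRange_one_eq_nil (by omega), PySem.List.pyRange_one_eq_nil (by omega)]

-- ===== VERDICT (by name: the statement is the Claim_ definition above) =====
theorem cscan_spec : Claim_equal_cscan := by
  intro c csize d _ hpre
  unfold Spec_cscan cscan cscan_alt
  by_cases hcs : csize ≤ 0
  · rw [PySem.List.pyRange_one_eq_nil (by omega), PySem.List.pyRange_one_eq_nil (by omega)]
    simp [cscanLoopA, cscanFind, cscanMin]
  · -- csize ≥ 1, so the loop body runs; c is nonempty under Pre_.
    have hclen : 0 < c.length := by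
      rcases hpre with h | ⟨p, hp, _⟩
      · omega
      · cases c
        · simp at hp
        · simp
    have hsafe : CSafe c d (PySem.List.pyRange 0 csize 1) := by
      rcases hpre with h | ⟨p, hp, hpd⟩
      · exact csafe_of_all c d _ (fun i hi => by
          rw [PySem.List.mem_pyRange_one] at hi; omega)
      · obtain ⟨j, hj, hjp⟩ := List.getElem_of_mem hp
        have he : (0 : Int) + ((csize.toNat : Nat) : Int) = csize := by omega
        refine he ▸ csafe_range c d csize.toNat 0 le_rfl ⟨(j : Int), by omega, by omega, ?_⟩
        simp [cgetd, List.getD_eq_getElem?_getD, List.getElem?_eq_getElem hj, hjp, hpd]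
    rw [loopA_eq c d _ 0 hsafe ⟨le_rfl, by omega⟩]
    cases hf : cscanFind c d (PySem.List.pyRange 0 csize 1) with
    | some i => rfl
    | none =>
      simp only
      rw [min_zero_step c csize hclen]
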